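-- pv_equiv track=rewrite | github.com/YiminYang27/open-foundry | forge/agents.py | parse_status_signal
-- ===== SOURCE A (Python) =====
-- def parse_status_signal(response: str) -> dict:
--     """Extract status marker from last lines of agent response."""
--     for line in reversed(response.strip().splitlines()):
--         line = line.strip()
--         if line == "[ANALYSIS_COMPLETE]":
--             return {"signal": "ANALYSIS_COMPLETE"}
--         if line.startswith("[NEEDS_DATA:") and line.endswith("]"):
--             return {"signal": "NEEDS_DATA",
--                     "item": line[len("[NEEDS_DATA:"):-1]}
--         if line.startswith("[DISAGREE_WITH:") and line.endswith("]"):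
--             parts = line[len("[DISAGREE_WITH:"):-1].split(":", 1)
--             return {"signal": "DISAGREE_WITH", "agent": parts[0],
--                     "topic": parts[1] if len(parts) > 1 else ""}
--         if line == "[INCONCLUSIVE]":
--             return {"signal": "INCONCLUSIVE"}
--     return {"signal": "NONE"}
-- ===== SOURCE B (Python) =====
-- def parse_status_signal(response: str) -> dict:
--     """Extract status marker from last lines of agent response."""
--
--     def classify(raw):
--         line = raw.strip()
--         if not (line.startswith("[") and line.endswith("]")):
--             return None
--         head, sep, rest = line[1:-1].partition(":")
--         if head == "ANALYSIS_COMPLETE" and not sep: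
--             return {"signal": "ANALYSIS_COMPLETE"}
--         if head == "INCONCLUSIVE" and not sep:
--             return {"signal": "INCONCLUSIVE"}
--         if head == "NEEDS_DATA" and sep:
--             return {"signal": "NEEDS_DATA", "item": rest}
--         if head == "DISAGREE_WITH" and sep:
--             agent, _, topic = rest.partition(":")
--             return {"signal": "DISAGREE_WITH", "agent": agent, "topic": topic}
--         return None
--
--     result = {"signal": "NONE"}
--     for raw in response.strip().splitlines():
--         found = classify(raw)
--         if found is not None:
--             result = found
--     return result
-- ===== Notes on version B (the rewrite author's own statement) =====
-- stated objective: alternative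
-- what changed: B scans lines forward with a last-match-wins accumulator instead of A's reversed early-return loop, and classifies each line by one bracket-unwrap plus partition-on-colon dispatch instead of A's per-marker prefix/suffix tests and slices.
import Mathlib
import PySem

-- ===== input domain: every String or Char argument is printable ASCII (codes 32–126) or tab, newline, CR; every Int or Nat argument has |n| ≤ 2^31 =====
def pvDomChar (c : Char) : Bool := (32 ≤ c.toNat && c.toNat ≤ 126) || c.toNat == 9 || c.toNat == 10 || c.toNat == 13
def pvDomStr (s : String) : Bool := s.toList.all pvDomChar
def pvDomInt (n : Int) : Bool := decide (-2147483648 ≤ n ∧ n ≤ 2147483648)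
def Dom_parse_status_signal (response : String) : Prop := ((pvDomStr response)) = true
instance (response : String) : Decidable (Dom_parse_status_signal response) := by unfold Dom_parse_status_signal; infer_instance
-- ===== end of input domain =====

-- B re-implements A with a forward last-match-wins fold and a bracket-unwrap + partition-on-colon
-- dispatch per line, instead of A's reversed early-return loop with per-marker prefix/suffix tests
-- (objective: alternative decomposition, same cost; return values proved equal on all inputs).

-- ===== PORT A =====
-- one iteration of A's loop body over a line (content as code points): the four marker tests in order
def pvStepA (raw : List Char) : Option (List (String × String)) :=
  let line := PySem.Chars.strip raw
  if line = "[ANALYSIS_COMPLETE]".toList then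
    some [("signal", "ANALYSIS_COMPLETE")]
  else if PySem.Chars.startswith line "[NEEDS_DATA:".toList && PySem.Chars.endswith line "]".toList then
    -- line[len("[NEEDS_DATA:"):-1]  (len = 12)
    some [("signal", "NEEDS_DATA"),
          ("item", String.ofList (PySem.Chars.slice line (some 12) (some (-1))))]
  else if PySem.Chars.startswith line "[DISAGREE_WITH:".toList && PySem.Chars.endswith line "]".toList then
    -- line[len("[DISAGREE_WITH:"):-1].split(":", 1)  (len = 15; sep ":" ≠ "" so splitMax? is some)
    let parts := (PySem.Chars.splitMax? (PySem.Chars.slice line (some 15) (some (-1))) ":".toList 1).getD []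
    some [("signal", "DISAGREE_WITH"),
          ("agent", String.ofList (parts.getD 0 [])),
          ("topic", if 1 < parts.length then String.ofList (parts.getD 1 []) else "")]
  else if line = "[INCONCLUSIVE]".toList then
    some [("signal", "INCONCLUSIVE")]
  else none

-- A's 'for line in reversed(...)' with early returns, as recursion over the reversed line list
def pvLoopA : List (List Char) → List (String × String)
  | [] => [("signal", "NONE")]
  | l :: rest =>
    match pvStepA l with
    | some r => r
    | none => pvLoopA rest

def parse_status_signal (response : String) : List (String × String) :=
  pvLoopA (PySem.Chars.splitlines (PySem.Chars.strip response.toList)).reverse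

-- ===== PORT B =====
-- str.partition(':') ported by hand over code points (PySem has no partition): scan to the FIRST
-- ':' and return (before, found?, after); exact for the single-character separator ':'
def pvPartitionColon : List Char → List Char × Bool × List Char
  | [] => ([], false, [])
  | c :: cs =>
    if c = ':' then ([], true, cs)
    else
      let p := pvPartitionColon cs
      (c :: p.1, p.2.1, p.2.2)

-- B's classify(raw): unwrap one bracket pair, partition the body on ':', dispatch on the head token
def pvClassify (raw : List Char) : Option (List (String × String)) :=
  let line := PySem.Chars.strip raw
  if PySem.Chars.startswith line "[".toList && PySem.Chars.endswith line "]".toList then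
    let body := PySem.Chars.slice line (some 1) (some (-1))
    let p := pvPartitionColon body
    if p.1 = "ANALYSIS_COMPLETE".toList ∧ p.2.1 = false then
      some [("signal", "ANALYSIS_COMPLETE")]
    else if p.1 = "INCONCLUSIVE".toList ∧ p.2.1 = false then
      some [("signal", "INCONCLUSIVE")]
    else if p.1 = "NEEDS_DATA".toList ∧ p.2.1 = true then
      some [("signal", "NEEDS_DATA"), ("item", String.ofList p.2.2)]
    else if p.1 = "DISAGREE_WITH".toList ∧ p.2.1 = true then
      let q := pvPartitionColon p.2.2
      some [("signal", "DISAGREE_WITH"),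
            ("agent", String.ofList q.1), ("topic", String.ofList q.2.2)]
    else none
  else none

def parse_status_signal_alt (response : String) : List (String × String) :=
  (PySem.Chars.splitlines (PySem.Chars.strip response.toList)).foldl
    (fun acc raw =>
      match pvClassify raw with
      | some r => r
      | none => acc)
    [("signal", "NONE")]

-- ===== PRECONDITION & SPEC =====
def Spec_parse_status_signal (response : String) (out : List (String × String)) : Prop := out = parse_status_signal_alt response
instance (response : String) (out : List (String × String)) : Decidable (Spec_parse_status_signal response out) := by unfold Spec_parse_status_signal; infer_instance

-- ===== CLAIM (what is proved, stated in full; the proofs are below) =====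
def Claim_equal_parse_status_signal : Prop := ∀ (response : String), Dom_parse_status_signal response → Spec_parse_status_signal response (parse_status_signal response)

-- ===== LEMMAS AND PROOFS =====

-- every char list either has no ':' or splits at its first ':'
lemma pvPartShape (m : List Char) :
    (':' ∉ m) ∨ ∃ pre r, ':' ∉ pre ∧ m = pre ++ ':' :: r := by
  induction m with
  | nil => exact Or.inl (by simp)
  | cons c cs ih =>
    by_cases hc : c = ':'
    · exact Or.inr ⟨[], cs, by simp, by simp [hc]⟩
    · rcases ih with h | ⟨pre, r, hpre, rfl⟩
      · exact Or.inl (by simp [h]; exact fun e => hc e.symm)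
      · exact Or.inr ⟨c :: pre, r, by simp [hpre]; exact fun e => hc e.symm, by simp⟩

lemma pvPart_no_colon (m : List Char) (h : ':' ∉ m) :
    pvPartitionColon m = (m, false, []) := by
  induction m with
  | nil => rfl
  | cons c cs ih =>
    simp only [List.mem_cons, not_or] at h
    have hc : ¬ c = ':' := fun e => h.1 e.symm
    simp only [pvPartitionColon]
    rw [if_neg hc]
    simp [ih h.2]

lemma pvPart_prefix (pre m : List Char) (h : ':' ∉ pre) :
    pvPartitionColon (pre ++ ':' :: m) = (pre, true, m) := by
  induction pre with
  | nil => simp [pvPartitionColon]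
  | cons c cs ih =>
    simp only [List.mem_cons, not_or] at h
    have hc : ¬ c = ':' := fun e => h.1 e.symm
    rw [List.cons_append]
    simp only [pvPartitionColon]
    rw [if_neg hc]
    simp [ih h.2]

-- splitOnMax.go with maxsplit exhausted copies the rest as the last piece
lemma pvGo0 (fuel : ℕ) (l cur : List Char) (acc : List (List Char)) :
    PySem.Chars.splitOnMax.go [':'] fuel 0 l cur acc = ((cur.reverse ++ l) :: acc).reverse := by
  cases fuel with
  | zero => rfl
  | succ f => cases l with
    | nil => simp [PySem.Chars.splitOnMax.go]
    | cons c cs => simp [PySem.Chars.splitOnMax.go]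

lemma pvGo1_no (l : List Char) (h : ':' ∉ l) :
    ∀ (fuel : ℕ) (cur : List Char) (acc : List (List Char)), l.length < fuel →
    PySem.Chars.splitOnMax.go [':'] fuel 1 l cur acc = ((cur.reverse ++ l) :: acc).reverse := by
  induction l with
  | nil =>
    intro fuel cur acc hf
    cases fuel with
    | zero => omega
    | succ f => simp [PySem.Chars.splitOnMax.go]
  | cons c cs ih =>
    intro fuel cur acc hf
    simp only [List.mem_cons, not_or] at h
    cases fuel with
    | zero => simp at hf
    | succ f =>
      have hpre : List.isPrefixOf [':'] (c :: cs) = false := by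
        simpa [List.isPrefixOf] using h.1
      simp only [PySem.Chars.splitOnMax.go, hpre]
      norm_num
      rw [ih h.2 f (c :: cur) acc (by simp at hf; omega)]
      simp

lemma pvGo1_yes (pre : List Char) (h : ':' ∉ pre) :
    ∀ (r : List Char) (fuel : ℕ) (cur : List Char) (acc : List (List Char)),
    (pre ++ ':' :: r).length < fuel →
    PySem.Chars.splitOnMax.go [':'] fuel 1 (pre ++ ':' :: r) cur acc =
      (r :: (cur.reverse ++ pre) :: acc).reverse := by
  induction pre with
  | nil =>
    intro r fuel cur acc hf
    cases fuel with
    | zero => simp at hf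
    | succ f =>
      have hpre : List.isPrefixOf [':'] (':' :: r) = true := by simp [List.isPrefixOf]
      rw [show ([] ++ ':' :: r : List Char) = ':' :: r from by simp]
      simp only [PySem.Chars.splitOnMax.go, hpre]
      norm_num
      rw [pvGo0]
      simp
  | cons c cs ih =>
    intro r fuel cur acc hf
    simp only [List.mem_cons, not_or] at h
    cases fuel with
    | zero => simp at hf
    | succ f =>
      have hpre : List.isPrefixOf [':'] (c :: (cs ++ ':' :: r)) = false := by
        simpa [List.isPrefixOf] using h.1
      rw [show ((c :: cs) ++ ':' :: r : List Char) = c :: (cs ++ ':' :: r) from by simp]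
      simp only [PySem.Chars.splitOnMax.go, hpre]
      norm_num
      rw [ih h.2 r f (c :: cur) acc (by simp at hf ⊢; omega)]
      simp

lemma pvSplitMax_no (m : List Char) (h : ':' ∉ m) :
    PySem.Chars.splitMax? m ":".toList 1 = some [m] := by
  rw [show ":".toList = [':'] from rfl]
  unfold PySem.Chars.splitMax? PySem.Chars.splitOnMax
  norm_num
  rw [pvGo1_no m h (m.length + 1) [] [] (by omega)]
  simp

lemma pvSplitMax_yes (pre r : List Char) (h : ':' ∉ pre) :
    PySem.Chars.splitMax? (pre ++ ':' :: r) ":".toList 1 = some [pre, r] := by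
  rw [show ":".toList = [':'] from rfl]
  unfold PySem.Chars.splitMax? PySem.Chars.splitOnMax
  norm_num
  rw [pvGo1_yes pre h r (pre.length + (r.length + 1) + 1) [] [] (by simp)]
  simp

-- xs[k:-1] on pre ++ mid ++ [c] with |pre| = k is mid
lemma pvSliceMid (pre mid : List Char) (c : Char) (k : ℕ) (hk : pre.length = k) :
    PySem.Chars.slice (pre ++ mid ++ [c]) (some (k : ℤ)) (some (-1)) = mid := by
  subst hk
  simp only [PySem.Chars.slice_eq_listSlice, PySem.List.slice,
    PySem.List.clampIdx_natCast, PySem.List.clampIdx_neg_one]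
  have h1 : min pre.length (pre ++ mid ++ [c]).length = pre.length := by
    simp [List.length_append]
  rw [h1]
  rw [show (pre ++ mid ++ [c] : List Char) = pre ++ (mid ++ [c]) from by simp]
  rw [List.drop_left]
  have h2 : (pre ++ (mid ++ [c])).length - 1 - pre.length = mid.length := by
    simp [List.length_append]
  rw [h2, List.take_left]

-- a string with prefix P (not ending in ']') and suffix "]" is P ++ mid ++ "]"
lemma pvDecomp (P l : List Char) (hlast : P.getLast? ≠ some ']')
    (hP : P <+: l) (hE : [']'] <:+ l) : ∃ m, l = P ++ m ++ [']'] := by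
  obtain ⟨t, rfl⟩ := hP
  rcases t.eq_nil_or_concat with rfl | ⟨m, c, rfl⟩
  · exfalso
    obtain ⟨u, hu⟩ := hE
    apply hlast
    have h2 : (P ++ ([] : List Char)).getLast? = some ']' := by
      rw [← hu]; simp
    simpa using h2
  · obtain ⟨u, hu⟩ := hE
    have h2 : c = ']' := by
      have h3 := congrArg List.getLast? hu
      simp at h3
      exact h3.symm
    exact ⟨m, by simp [h2]⟩

-- the heart: A's loop body and B's classify agree on every line
lemma pvStep_eq (raw : List Char) : pvStepA raw = pvClassify raw := by
  unfold pvStepA pvClassify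
  generalize PySem.Chars.strip raw = l
  by_cases hS : PySem.Chars.startswith l "[".toList = true ∧ PySem.Chars.endswith l "]".toList = true
  case neg =>
    have hA1 : l ≠ "[ANALYSIS_COMPLETE]".toList := by
      rintro rfl; exact hS ⟨by decide, by decide⟩
    have hA4 : l ≠ "[INCONCLUSIVE]".toList := by
      rintro rfl; exact hS ⟨by decide, by decide⟩
    have hA2 : ¬ (PySem.Chars.startswith l "[NEEDS_DATA:".toList &&
        PySem.Chars.endswith l "]".toList) = true := by
      intro hc
      simp only [Bool.and_eq_true] at hc
      refine hS ⟨?_, hc.2⟩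
      rw [PySem.Chars.startswith_iff] at hc ⊢
      exact List.IsPrefix.trans (by decide) hc.1
    have hA3 : ¬ (PySem.Chars.startswith l "[DISAGREE_WITH:".toList &&
        PySem.Chars.endswith l "]".toList) = true := by
      intro hc
      simp only [Bool.and_eq_true] at hc
      refine hS ⟨?_, hc.2⟩
      rw [PySem.Chars.startswith_iff] at hc ⊢
      exact List.IsPrefix.trans (by decide) hc.1
    have hB : ¬ (PySem.Chars.startswith l "[".toList &&
        PySem.Chars.endswith l "]".toList) = true := by
      intro hc; simp only [Bool.and_eq_true] at hc; exact hS hc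
    simp only [if_neg hA1, if_neg hA2, if_neg hA3, if_neg hA4, if_neg hB]
  case pos =>
    obtain ⟨hS1, hS2⟩ := hS
    have hB : (PySem.Chars.startswith l "[".toList &&
        PySem.Chars.endswith l "]".toList) = true := by
      rw [Bool.and_eq_true]; exact ⟨hS1, hS2⟩
    have hE : [']'] <:+ l := by
      have := (PySem.Chars.endswith_iff l "]".toList).mp hS2
      simpa using this
    obtain ⟨core, rfl⟩ : ∃ m, l = ['['] ++ m ++ [']'] := by
      apply pvDecomp ['['] l (by decide) _ hE
      have := (PySem.Chars.startswith_iff l "[".toList).mp hS1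
      simpa using this
    by_cases h1 : (['['] ++ core ++ [']'] : List Char) = "[ANALYSIS_COMPLETE]".toList
    · rw [h1]; decide
    · by_cases h2 : (PySem.Chars.startswith (['['] ++ core ++ [']']) "[NEEDS_DATA:".toList &&
          PySem.Chars.endswith (['['] ++ core ++ [']']) "]".toList) = true
      · have h2' := h2
        simp only [Bool.and_eq_true] at h2'
        obtain ⟨m, hm⟩ : ∃ m, (['['] ++ core ++ [']'] : List Char) = "[NEEDS_DATA:".toList ++ m ++ [']'] := by
          apply pvDecomp _ _ (by decide) _ hE
          rw [← PySem.Chars.startswith_iff]; exact h2'.1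
        have hl2 : (['['] ++ core ++ [']'] : List Char) =
            ['['] ++ ("NEEDS_DATA".toList ++ ':' :: m) ++ [']'] := by
          rw [hm, show "[NEEDS_DATA:".toList = '[' :: ("NEEDS_DATA".toList ++ [':']) from by decide]
          simp
        have hsl12 : PySem.Chars.slice (['['] ++ core ++ [']']) (some 12) (some (-1)) = m := by
          rw [hm]; exact pvSliceMid _ _ _ _ (by decide)
        have hsl1 : PySem.Chars.slice (['['] ++ core ++ [']']) (some 1) (some (-1)) =
            "NEEDS_DATA".toList ++ ':' :: m := by
          rw [hl2]; exact pvSliceMid _ _ _ _ (by decide)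
        rw [if_neg h1, if_pos h2, if_pos hB]
        simp only [hsl12, hsl1, pvPart_prefix "NEEDS_DATA".toList m (by decide)]
        simp
      · by_cases h3 : (PySem.Chars.startswith (['['] ++ core ++ [']']) "[DISAGREE_WITH:".toList &&
            PySem.Chars.endswith (['['] ++ core ++ [']']) "]".toList) = true
        · have h3' := h3
          simp only [Bool.and_eq_true] at h3'
          obtain ⟨m, hm⟩ : ∃ m, (['['] ++ core ++ [']'] : List Char) = "[DISAGREE_WITH:".toList ++ m ++ [']'] := by
            apply pvDecomp _ _ (by decide) _ hE
            rw [← PySem.Chars.startswith_iff]; exact h3'.1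
          have hl2 : (['['] ++ core ++ [']'] : List Char) =
              ['['] ++ ("DISAGREE_WITH".toList ++ ':' :: m) ++ [']'] := by
            rw [hm, show "[DISAGREE_WITH:".toList = '[' :: ("DISAGREE_WITH".toList ++ [':']) from by decide]
            simp
          have hsl15 : PySem.Chars.slice (['['] ++ core ++ [']']) (some 15) (some (-1)) = m := by
            rw [hm]; exact pvSliceMid _ _ _ _ (by decide)
          have hsl1 : PySem.Chars.slice (['['] ++ core ++ [']']) (some 1) (some (-1)) =
              "DISAGREE_WITH".toList ++ ':' :: m := by
            rw [hl2]; exact pvSliceMid _ _ _ _ (by decide)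
          rw [if_neg h1, if_neg h2, if_pos h3, if_pos hB]
          simp only [hsl15, hsl1, pvPart_prefix "DISAGREE_WITH".toList m (by decide)]
          rcases pvPartShape m with hno | ⟨pre, r, hpre, rfl⟩
          · simp only [pvSplitMax_no m hno, pvPart_no_colon m hno]
            simp
          · simp only [pvSplitMax_yes pre r hpre, pvPart_prefix pre r hpre]
            simp
        · by_cases h4 : (['['] ++ core ++ [']'] : List Char) = "[INCONCLUSIVE]".toList
          · rw [if_neg h1, if_neg h2, if_neg h3, h4]; decide
          · rw [if_neg h1, if_neg h2, if_neg h3, if_neg h4, if_pos hB]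
            have hsl1 : PySem.Chars.slice (['['] ++ core ++ [']']) (some 1) (some (-1)) = core :=
              pvSliceMid _ _ _ _ (by decide)
            simp only [hsl1]
            rcases pvPartShape core with hno | ⟨pre, r, hpre, rfl⟩
            · simp only [pvPart_no_colon core hno]
              have d1 : core ≠ ['A','N','A','L','Y','S','I','S','_','C','O','M','P','L','E','T','E'] :=
                fun hcore => h1 (by rw [hcore]; decide)
              have d2 : core ≠ ['I','N','C','O','N','C','L','U','S','I','V','E'] :=
                fun hcore => h4 (by rw [hcore]; decide)
              simp [d1, d2]
            · simp only [pvPart_prefix pre r hpre]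
              have d3 : pre ≠ ['N','E','E','D','S','_','D','A','T','A'] := by
                rintro rfl
                apply h2
                rw [Bool.and_eq_true]
                refine ⟨?_, hS2⟩
                rw [PySem.Chars.startswith_iff]
                exact ⟨r ++ [']'], by simp [show "[NEEDS_DATA:".toList = '[' :: ("NEEDS_DATA".toList ++ [':']) from by decide]⟩
              have d4 : pre ≠ ['D','I','S','A','G','R','E','E','_','W','I','T','H'] := by
                rintro rfl
                apply h3
                rw [Bool.and_eq_true]
                refine ⟨?_, hS2⟩
                rw [PySem.Chars.startswith_iff]
                exact ⟨r ++ [']'], by simp [show "[DISAGREE_WITH:".toList = '[' :: ("DISAGREE_WITH".toList ++ [':']) from by decide]⟩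
              simp [d3, d4]

-- loop lemma: first match over the reversed list = last match of a forward fold
lemma pvLoop_eq (ls : List (List Char)) :
    pvLoopA ls.reverse = ls.foldl
      (fun acc raw => match pvClassify raw with | some r => r | none => acc)
      [("signal", "NONE")] := by
  induction ls using List.reverseRecOn with
  | nil => rfl
  | append_singleton ls a ih =>
    simp only [List.reverse_append, List.reverse_singleton, List.singleton_append,
      List.foldl_append, List.foldl_cons, List.foldl_nil]
    rw [pvLoopA, pvStep_eq a, ← ih]

theorem parse_status_signal_spec : Claim_equal_parse_status_signal := by
  unfold Claim_equal_parse_status_signal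
  intro response _
  unfold Spec_parse_status_signal parse_status_signal parse_status_signal_alt
  exact pvLoop_eq _
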